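-- pv_equiv track=rewrite | github.com/LaurentPRAT-DB/dolly_lpt | genai_evaluation/utils.py | merge_contexts
-- ===== SOURCE A (Python) =====
-- from typing import List, Dict, Any, Optional
--
-- def merge_contexts(
--     contexts: List[str],
--     max_length: int = 4096,
--     separator: str = "\n\n"
-- ) -> str:
--     """
--     Merge multiple context passages, respecting max length.
--
--     Args:
--         contexts: List of context passages
--         max_length: Maximum total length in characters
--         separator: Separator between contexts
--
--     Returns:
--         Merged context string
--     """
--     merged = []
--     current_length = 0
--
--     for ctx in contexts:
--         ctx_length = len(ctx) + len(separator)
--         if current_length + ctx_length > max_length: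
--             break
--         merged.append(ctx)
--         current_length += ctx_length
--
--     return separator.join(merged)
-- ===== SOURCE B (Python) =====
-- def merge_contexts(contexts, max_length=4096, separator="\n\n"):
--     """Prefix-sum table + binary search for the cutoff, instead of scanning with a break."""
--     sep_len = len(separator)
--     cumulative = []
--     total = 0
--     for c in contexts:
--         total += len(c) + sep_len
--         cumulative.append(total)
--     # bisect_right(cumulative, max_length): cumulative is non-decreasing
--     lo, hi = 0, len(cumulative)
--     while lo < hi:
--         mid = (lo + hi) // 2
--         if cumulative[mid] <= max_length:
--             lo = mid + 1
--         else:
--             hi = mid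
--     return separator.join(contexts[:lo])
-- ===== Notes on version B (the rewrite author's own statement) =====
-- stated objective: alternative
-- what changed: Replaces the scan-with-early-break by a prefix-sum table plus a hand-rolled bisect_right binary search locating the cutoff, then a single slice-and-join.
import Mathlib
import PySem

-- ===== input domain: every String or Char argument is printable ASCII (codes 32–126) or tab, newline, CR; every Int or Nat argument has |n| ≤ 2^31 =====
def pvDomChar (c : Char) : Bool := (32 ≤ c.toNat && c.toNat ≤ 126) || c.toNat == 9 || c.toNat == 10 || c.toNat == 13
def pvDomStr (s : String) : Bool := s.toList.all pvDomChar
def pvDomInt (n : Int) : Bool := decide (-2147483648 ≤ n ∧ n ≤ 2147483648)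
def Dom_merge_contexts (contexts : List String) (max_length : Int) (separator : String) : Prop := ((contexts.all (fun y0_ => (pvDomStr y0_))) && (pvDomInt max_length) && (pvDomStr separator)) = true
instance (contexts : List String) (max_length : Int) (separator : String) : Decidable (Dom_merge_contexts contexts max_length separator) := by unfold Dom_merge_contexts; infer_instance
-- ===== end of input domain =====

-- B replaces A's scan-with-early-break by a prefix-sum table plus a binary search for the
-- cutoff index (objective: alternative decomposition, same asymptotic cost).

-- ===== PORT A =====
-- A's for-loop with `break`, as structural recursion over the remaining contexts,
-- carrying current_length; `merged` is the list being built.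
def mergeLoopA (maxL : Int) (sep : String) : List String → Int → List String
  | [], _ => []
  | ctx :: rest, cur =>
    let ctxLen : Int := PySem.Str.len ctx + PySem.Str.len sep
    if cur + ctxLen > maxL then []            -- break
    else ctx :: mergeLoopA maxL sep rest (cur + ctxLen)

def merge_contexts (contexts : List String) (max_length : Int) (separator : String) : String :=
  PySem.Str.join separator (mergeLoopA max_length separator contexts 0)

-- ===== PORT B =====
-- B's first loop: running total, appending each cumulative value (built front-first).
def cumLoopB (sepLen : Int) : List String → Int → List Int
  | [], _ => []
  | c :: rest, total =>
    let t := total + (PySem.Str.len c + sepLen)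
    t :: cumLoopB sepLen rest t

-- B's while-loop: bisect_right.  lo, hi are kept as Nat (in Python they stay in
-- 0 … len(cumulative), so `(lo+hi)//2` is plain Nat division); the index mid always
-- satisfies lo ≤ mid < hi ≤ length, so `getD … 0` is the in-range cumulative[mid].
def bisectLoopB (cum : List Int) (x : Int) (lo hi : Nat) : Nat :=
  if lo < hi then
    let mid := (lo + hi) / 2
    if cum.getD mid 0 ≤ x then bisectLoopB cum x (mid + 1) hi
    else bisectLoopB cum x lo mid
  else lo
termination_by hi - lo
decreasing_by all_goals omega

def merge_contexts_alt (contexts : List String) (max_length : Int) (separator : String) : String :=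
  let cumulative := cumLoopB (PySem.Str.len separator) contexts 0
  let cutoff := bisectLoopB cumulative max_length 0 cumulative.length
  PySem.Str.join separator (contexts.take cutoff)   -- contexts[:cutoff], cutoff ≥ 0

-- ===== PRECONDITION & SPEC =====
def Spec_merge_contexts (contexts : List String) (max_length : Int) (separator : String) (out : String) : Prop := out = merge_contexts_alt contexts max_length separator
instance (contexts : List String) (max_length : Int) (separator : String) (out : String) : Decidable (Spec_merge_contexts contexts max_length separator out) := by unfold Spec_merge_contexts; infer_instance

-- ===== CLAIM (what is proved, stated in full; the proofs are below) =====
def Claim_equal_merge_contexts : Prop := ∀ (contexts : List String) (max_length : Int) (separator : String), Dom_merge_contexts contexts max_length separator → Spec_merge_contexts contexts max_length separator (merge_contexts contexts max_length separator)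

-- ===== LEMMAS AND PROOFS =====

-- number of leading cumulative entries ≤ x (what bisect_right returns on a sorted list)
def twCount (x : Int) : List Int → Nat
  | [] => 0
  | t :: rest => if t ≤ x then twCount x rest + 1 else 0

lemma twCount_le_length (x : Int) (cum : List Int) : twCount x cum ≤ cum.length := by
  induction cum with
  | nil => simp [twCount]
  | cons t rest ih => simp only [twCount, List.length_cons]; split_ifs <;> omega

-- A's loop takes exactly the first twCount-many contexts
lemma mergeLoopA_eq_take (maxL : Int) (sep : String) (xs : List String) (cur : Int) :
    mergeLoopA maxL sep xs cur
      = xs.take (twCount maxL (cumLoopB (PySem.Str.len sep) xs cur)) := by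
  induction xs generalizing cur with
  | nil => simp [mergeLoopA, cumLoopB]
  | cons c rest ih =>
    simp only [mergeLoopA, cumLoopB, twCount]
    by_cases h : cur + (PySem.Str.len c + PySem.Str.len sep) ≤ maxL
    · rw [if_neg (by omega), if_pos h, List.take_succ_cons, ih]
    · rw [if_pos (by omega), if_neg h, List.take_zero]

-- every cumulative entry is ≥ the starting total (string lengths are nonnegative)
lemma cumLoopB_ge (sepLen : Int) (hsep : 0 ≤ sepLen) (xs : List String) (cur : Int)
    (i : Nat) (hi : i < (cumLoopB sepLen xs cur).length) :
    cur ≤ (cumLoopB sepLen xs cur).getD i 0 := by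
  induction xs generalizing cur i with
  | nil => simp [cumLoopB] at hi
  | cons c rest ih =>
    have hc : (0:Int) ≤ PySem.Str.len c := by
      simp [PySem.Str.len_eq]
    cases i with
    | zero => simp [cumLoopB]; omega
    | succ j =>
      simp only [cumLoopB, List.length_cons] at hi
      have := ih (cur + (PySem.Str.len c + sepLen)) j (by omega)
      simp only [cumLoopB, List.getD_cons_succ]
      omega

-- characterisation: index i is < twCount iff cumulative[i] ≤ x (cumLoopB is nondecreasing)
lemma cumLoopB_mem_iff (sepLen : Int) (hsep : 0 ≤ sepLen) (x : Int) (xs : List String)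
    (cur : Int) (i : Nat) (hi : i < (cumLoopB sepLen xs cur).length) :
    ((cumLoopB sepLen xs cur).getD i 0 ≤ x ↔ i < twCount x (cumLoopB sepLen xs cur)) := by
  induction xs generalizing cur i with
  | nil => simp [cumLoopB] at hi
  | cons c rest ih =>
    simp only [cumLoopB, List.length_cons] at hi ⊢
    cases i with
    | zero =>
      simp only [List.getD_cons_zero, twCount]
      split_ifs with h
      · simp only [PySem.Str.len_eq, String.length_toList] at h
        simp [h]
      · simp only [PySem.Str.len_eq, String.length_toList] at h
        simp [h]
    | succ j =>
      simp only [List.getD_cons_succ, twCount]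
      split_ifs with h
      · rw [ih (cur + (PySem.Str.len c + sepLen)) j (by omega)]
        omega
      · -- head already > x; every later entry is ≥ head > x
        have hge := cumLoopB_ge sepLen hsep rest (cur + (PySem.Str.len c + sepLen)) j (by omega)
        constructor
        · intro hle; omega
        · intro hlt; omega

-- the binary search converges to twCount
lemma bisectLoopB_eq (cum : List Int) (x : Int)
    (hchar : ∀ i, i < cum.length → (cum.getD i 0 ≤ x ↔ i < twCount x cum)) :
    ∀ lo hi, lo ≤ twCount x cum → twCount x cum ≤ hi → hi ≤ cum.length →
      bisectLoopB cum x lo hi = twCount x cum := by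
  intro lo hi
  induction hn : hi - lo using Nat.strong_induction_on generalizing lo hi with
  | _ n ih =>
    intro hlo hhi hlen
    rw [bisectLoopB]
    by_cases hlt : lo < hi
    · simp only [if_pos hlt]
      set mid := (lo + hi) / 2 with hmid
      have hmlt : mid < hi := by omega
      have hmlen : mid < cum.length := by omega
      by_cases hc : cum.getD mid 0 ≤ x
      · have : mid < twCount x cum := (hchar mid hmlen).mp hc
        rw [if_pos hc]
        exact ih (hi - (mid + 1)) (by omega) (mid + 1) hi rfl (by omega) hhi hlen
      · have : ¬ mid < twCount x cum := fun h => hc ((hchar mid hmlen).mpr h)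
        rw [if_neg hc]
        exact ih (mid - lo) (by omega) lo mid rfl hlo (by omega) (by omega)
    · simp only [if_neg hlt]
      omega

-- ===== VERDICT (by name: the statement is the Claim_ definition above) =====
theorem merge_contexts_spec : Claim_equal_merge_contexts := by
  intro contexts max_length separator _
  unfold Spec_merge_contexts merge_contexts merge_contexts_alt
  have hsep : (0:Int) ≤ PySem.Str.len separator := by simp [PySem.Str.len_eq]
  rw [mergeLoopA_eq_take]
  congr 1
  rw [bisectLoopB_eq _ _ (cumLoopB_mem_iff _ hsep max_length contexts 0)
        0 _ (Nat.zero_le _) (twCount_le_length _ _) le_rfl]
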